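-- pv_equiv track=rewrite | github.com/1r0nw1ll/quantum-arithmetic-research | qa_hensel_selforg_experiment.py | analyze_mod3_reduction
-- ===== SOURCE A (Python) =====
-- from collections import Counter
--
-- def qa_step(bi, ei, m):
--     """A1-compliant QA step: states in {1,...,m}."""
--     b_new = ((bi + ei - 1) % m) + 1
--     e_new = ((ei + b_new - 1) % m) + 1
--     return b_new, e_new
--
-- def classify_orbit(bi, ei, m):
--     """Return (orbit_type, cycle_length). Orbit by cycle length."""
--     seen = []
--     state = (bi, ei)
--     for _ in range(m * m + 1):
--         if state in seen:
--             clen = len(seen) - seen.index(state)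
--             return clen
--         seen.append(state)
--         state = qa_step(state[0], state[1], m)
--     return -1
--
-- def orbit_family_id(bi, ei, m):
--     """
--     Return a canonical orbit family identifier.
--     Two (b,e) pairs are in the same family if they lie on the same cycle.
--     """
--     visited = set()
--     state = (bi, ei)
--     for _ in range(m * m + 1):
--         if state in visited:
--             # Return the lexicographically smallest state in the cycle
--             cycle_start = state
--             cycle = [cycle_start]
--             s = qa_step(cycle_start[0], cycle_start[1], m)
--             while s != cycle_start:
--                 cycle.append(s)
--                 s = qa_step(s[0], s[1], m)
--             return min(cycle)  # canonical representative
--         visited.add(state)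
--         state = qa_step(state[0], state[1], m)
--     return (bi, ei)
--
-- def orbit_type_label(clen):
--     """Classify by cycle length into QA orbit types."""
--     if clen == 1:
--         return 'singularity'
--     elif clen <= 8:
--         return 'satellite'
--     else:
--         return 'cosmos'
--
-- def analyze_mod3_reduction(cell_b, cell_e, m):
--     """
--     For m=9 or m=27, reduce each cell's (b,e) to mod-3 and check
--     whether the mod-3 orbit structure is preserved.
--
--     This tests the Hensel lift: mod-9 families should project down
--     to mod-3 families cleanly.
--     """
--     if m <= 3:
--         return None
--
--     m_reduced = 3
--     reduced_orbits = Counter()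
--     full_orbits = Counter()
--
--     for b, e in zip(cell_b, cell_e):
--         # Full orbit
--         full_fid = orbit_family_id(b, e, m)
--         full_clen = classify_orbit(b, e, m)
--         full_orbits[orbit_type_label(full_clen)] += 1
--
--         # Reduced mod-3
--         b3 = ((b - 1) % m_reduced) + 1  # A1-compliant reduction
--         e3 = ((e - 1) % m_reduced) + 1
--         red_clen = classify_orbit(b3, e3, m_reduced)
--         reduced_orbits[orbit_type_label(red_clen)] += 1
--
--     return {
--         'full_orbit_census': dict(full_orbits),
--         'reduced_mod3_census': dict(reduced_orbits),
--     }
-- ===== SOURCE B (Python) =====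
-- def _qa_step(b, e, m):
--     b = ((b + e - 1) % m) + 1
--     e = ((e + b - 1) % m) + 1
--     return b, e
--
-- def _label_of_state(b, e, m):
--     # The QA step is the invertible linear map (b,e) -> (b+e, b+2e) on (Z/m)^2
--     # (shifted to representatives 1..m), so one step from anywhere lands on a
--     # pure cycle.  The label only depends on whether the cycle length is 1,
--     # <= 8, or > 8, so at most 8 first-return checks decide it -- no cycle
--     # length, no visited structure.
--     t = _qa_step(b, e, m)
--     s = _qa_step(t[0], t[1], m)
--     if s == t:
--         return 'singularity'
--     n = 1
--     while n < 8:
--         s = _qa_step(s[0], s[1], m)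
--         n += 1
--         if s == t:
--             return 'satellite'
--     return 'cosmos'
--
-- def analyze_mod3_reduction(cell_b, cell_e, m):
--     if m <= 3:
--         return None
--     full = {}
--     red = {}
--     for b, e in zip(cell_b, cell_e):
--         lab = _label_of_state(b, e, m)
--         full[lab] = full.get(lab, 0) + 1
--         lab3 = _label_of_state((b - 1) % 3 + 1, (e - 1) % 3 + 1, 3)
--         red[lab3] = red.get(lab3, 0) + 1
--     return {'full_orbit_census': full, 'reduced_mod3_census': red}
-- ===== Notes on version B (the rewrite author's own statement) =====
-- stated objective: faster
-- what changed: B does no cycle detection at all: the QA step is the invertible linear map (b,e)->(b+e,b+2e) mod m, so one step lands on a pure cycle and the orbit-type label (cycle length 1, <=8, or >8) is decided by at most 8 first-return checks per cell, in O(1) per cell; A keeps a growing 'seen' list with O(len) membership and .index scans over up to m^2+1 steps, plus a computed-but-unused orbit_family_id walk, which B drops.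
import Mathlib
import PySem

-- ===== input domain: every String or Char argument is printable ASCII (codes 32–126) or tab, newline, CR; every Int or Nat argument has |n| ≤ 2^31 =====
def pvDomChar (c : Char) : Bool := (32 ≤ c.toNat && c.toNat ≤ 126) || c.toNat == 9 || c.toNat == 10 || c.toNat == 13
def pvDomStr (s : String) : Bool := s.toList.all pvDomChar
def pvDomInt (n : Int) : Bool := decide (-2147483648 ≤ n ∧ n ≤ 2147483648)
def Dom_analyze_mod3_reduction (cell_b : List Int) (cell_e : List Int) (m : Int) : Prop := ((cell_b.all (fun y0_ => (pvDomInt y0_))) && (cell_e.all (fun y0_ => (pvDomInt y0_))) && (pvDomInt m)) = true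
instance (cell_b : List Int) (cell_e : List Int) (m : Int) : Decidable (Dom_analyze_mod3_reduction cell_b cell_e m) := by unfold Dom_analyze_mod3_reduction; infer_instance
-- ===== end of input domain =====

-- B labels each cell with no cycle-detection bookkeeping: the QA step is an invertible
-- linear map mod m, so one step lands on a pure cycle and the orbit-type label is decided
-- by at most 8 first-return checks; B also drops A's computed-but-unused orbit_family_id. (faster)

-- ===== PORT A =====
def qa_step (bi ei m : Int) : Int × Int :=
  let b_new := PySem.Int.mod (bi + ei - 1) m + 1
  let e_new := PySem.Int.mod (ei + b_new - 1) m + 1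
  (b_new, e_new)

def classify_orbit_go (m : Int) : Nat → List (Int × Int) → (Int × Int) → Int
  | 0, _, _ => -1
  | fuel + 1, seen, state =>
    match PySem.List.index? seen state with
    | some i => (seen.length : Int) - (i : Int)
    | none => classify_orbit_go m fuel (seen ++ [state]) (qa_step state.1 state.2 m)

def classify_orbit (bi ei m : Int) : Int :=
  classify_orbit_go m (m * m + 1).toNat [] (bi, ei)

-- inner 'while s != cycle_start' of orbit_family_id, with fuel m*m+1 (enough for every cycle,
-- since the cycle's states lie in {1..m}×{1..m}); on fuel exhaustion we return the list so far
def cycle_collect (m : Int) (cycle_start : Int × Int) : Nat → List (Int × Int) → (Int × Int) → List (Int × Int)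
  | 0, cycle, _ => cycle
  | fuel + 1, cycle, s =>
    if s = cycle_start then cycle
    else cycle_collect m cycle_start fuel (cycle ++ [s]) (qa_step s.1 s.2 m)

def orbit_family_id_go (bi ei m : Int) : Nat → PySem.Set (Int × Int) → (Int × Int) → Int × Int
  | 0, _, _ => (bi, ei)
  | fuel + 1, visited, state =>
    if state ∈ visited then
      let cycle := cycle_collect m state (m * m + 1).toNat [state] (qa_step state.1 state.2 m)
      -- min(cycle): Python's lexicographic minimum over int pairs (exact; cycle is nonempty)
      (PySem.List.min2? cycle (·.1) (·.2)).getD (bi, ei)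
    else orbit_family_id_go bi ei m fuel (PySem.Set.add visited state) (qa_step state.1 state.2 m)

def orbit_family_id (bi ei m : Int) : Int × Int :=
  orbit_family_id_go bi ei m (m * m + 1).toNat PySem.Set.empty (bi, ei)

def orbit_type_label (clen : Int) : String :=
  if clen = 1 then "singularity"
  else if clen ≤ 8 then "satellite"
  else "cosmos"

def analyze_body (m : Int) (acc : PySem.Dict String Int × PySem.Dict String Int) (p : Int × Int) :
    PySem.Dict String Int × PySem.Dict String Int :=
  let m_reduced : Int := 3
  let _full_fid := orbit_family_id p.1 p.2 m
  let full_clen := classify_orbit p.1 p.2 m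
  let full' := acc.1.modify (orbit_type_label full_clen) 0 (· + 1)
  let b3 := PySem.Int.mod (p.1 - 1) m_reduced + 1
  let e3 := PySem.Int.mod (p.2 - 1) m_reduced + 1
  let red_clen := classify_orbit b3 e3 m_reduced
  let red' := acc.2.modify (orbit_type_label red_clen) 0 (· + 1)
  (full', red')

def analyze_mod3_reduction (cell_b : List Int) (cell_e : List Int) (m : Int) :
    Option (List (String × List (String × Int))) :=
  if m ≤ 3 then none
  else
    let res := (cell_b.zip cell_e).foldl (analyze_body m) (PySem.Dict.empty, PySem.Dict.empty)
    some [("full_orbit_census", res.1.items), ("reduced_mod3_census", res.2.items)]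

-- ===== PORT B =====
def qa_step_alt (b e m : Int) : Int × Int :=
  let b' := PySem.Int.mod (b + e - 1) m + 1
  let e' := PySem.Int.mod (e + b' - 1) m + 1
  (b', e')

-- Source B's bounded 'while n < 8' loop: the 7 first-return checks at steps 2..8
def label_walk (m : Int) (t : Int × Int) : Nat → (Int × Int) → String
  | 0, _ => "cosmos"
  | k + 1, s =>
    if s = t then "satellite"
    else label_walk m t k (qa_step_alt s.1 s.2 m)

def label_of_state (b e m : Int) : String :=
  let t := qa_step_alt b e m
  let s := qa_step_alt t.1 t.2 m
  if s = t then "singularity"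
  else label_walk m t 7 (qa_step_alt s.1 s.2 m)

def analyze_body_alt (m : Int) (acc : PySem.Dict String Int × PySem.Dict String Int) (p : Int × Int) :
    PySem.Dict String Int × PySem.Dict String Int :=
  let lab := label_of_state p.1 p.2 m
  let full' := acc.1.insert lab (acc.1.getD lab 0 + 1)
  let lab3 := label_of_state (PySem.Int.mod (p.1 - 1) 3 + 1) (PySem.Int.mod (p.2 - 1) 3 + 1) 3
  let red' := acc.2.insert lab3 (acc.2.getD lab3 0 + 1)
  (full', red')

def analyze_mod3_reduction_alt (cell_b : List Int) (cell_e : List Int) (m : Int) :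
    Option (List (String × List (String × Int))) :=
  if m ≤ 3 then none
  else
    let st := (cell_b.zip cell_e).foldl (analyze_body_alt m) (PySem.Dict.empty, PySem.Dict.empty)
    some [("full_orbit_census", st.1.items), ("reduced_mod3_census", st.2.items)]

-- ===== PRECONDITION & SPEC =====
def Spec_analyze_mod3_reduction (cell_b : List Int) (cell_e : List Int) (m : Int) (out : Option (List (String × List (String × Int)))) : Prop := out = analyze_mod3_reduction_alt cell_b cell_e m
instance (cell_b : List Int) (cell_e : List Int) (m : Int) (out : Option (List (String × List (String × Int)))) : Decidable (Spec_analyze_mod3_reduction cell_b cell_e m out) := by unfold Spec_analyze_mod3_reduction; infer_instance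

-- ===== CLAIM (what is proved, stated in full; the proofs are below) =====
def Claim_equal_analyze_mod3_reduction : Prop := ∀ (cell_b : List Int) (cell_e : List Int) (m : Int), Dom_analyze_mod3_reduction cell_b cell_e m → Spec_analyze_mod3_reduction cell_b cell_e m (analyze_mod3_reduction cell_b cell_e m)

-- ===== LEMMAS AND PROOFS =====

-- the QA step as a self-map, and the box {1..m}×{1..m} it maps into
def pvStep (m : Int) (p : Int × Int) : Int × Int := qa_step p.1 p.2 m

def pvInBox (m : Int) (p : Int × Int) : Prop := 1 ≤ p.1 ∧ p.1 ≤ m ∧ 1 ≤ p.2 ∧ p.2 ≤ m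

lemma step_box (m : Int) (hm : 0 < m) (p : Int × Int) : pvInBox m (pvStep m p) := by
  have h1 := PySem.Int.mod_nonneg (p.1 + p.2 - 1) hm
  have h2 := PySem.Int.mod_lt (p.1 + p.2 - 1) hm
  have h3 := PySem.Int.mod_nonneg (p.2 + (PySem.Int.mod (p.1 + p.2 - 1) m + 1) - 1) hm
  have h4 := PySem.Int.mod_lt (p.2 + (PySem.Int.mod (p.1 + p.2 - 1) m + 1) - 1) hm
  simp only [pvStep, qa_step, pvInBox]
  omega

lemma iter_box (m : Int) (hm : 0 < m) (p : Int × Int) (hp : pvInBox m p) (k : Nat) :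
    pvInBox m ((pvStep m)^[k] p) := by
  induction k with
  | zero => simpa
  | succ k ih => rw [Function.iterate_succ_apply']; exact step_box m hm _

-- explicit inverse of the QA step (the step is the linear map (b,e) ↦ (b+e, b+2e) mod m)
def pvInv (m : Int) (q : Int × Int) : Int × Int :=
  (PySem.Int.mod (2*q.1 - q.2 - 1) m + 1, PySem.Int.mod (q.2 - q.1 - 1) m + 1)

lemma inv_step (m : Int) (hm : 0 < m) (p : Int × Int) (hp : pvInBox m p) :
    pvInv m (pvStep m p) = p := by
  obtain ⟨b, e⟩ := p
  obtain ⟨hb1, hb2, he1, he2⟩ := hp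
  simp only [pvInv, pvStep, qa_step, PySem.Int.mod_eq_emod_of_pos hm]
  have h1 : (b + e - 1) % m ≡ b + e - 1 [ZMOD m] := Int.emod_emod_of_dvd _ dvd_rfl
  have h2 : (e + ((b + e - 1) % m + 1) - 1) % m ≡ e + (b + e - 1) [ZMOD m] := by
    have : (e + ((b + e - 1) % m + 1) - 1) % m ≡ e + ((b + e - 1) % m + 1) - 1 [ZMOD m] :=
      Int.emod_emod_of_dvd _ dvd_rfl
    calc (e + ((b + e - 1) % m + 1) - 1) % m
        ≡ e + ((b + e - 1) % m + 1) - 1 [ZMOD m] := this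
      _ = (b + e - 1) % m + e := by ring
      _ ≡ (b + e - 1) + e [ZMOD m] := h1.add_right e
      _ = e + (b + e - 1) := by ring
  have k1 : (2 * ((b + e - 1) % m + 1) - ((e + ((b + e - 1) % m + 1) - 1) % m + 1) - 1)
      = 2 * ((b + e - 1) % m) - (e + ((b + e - 1) % m + 1) - 1) % m := by ring
  have k2 : ((e + ((b + e - 1) % m + 1) - 1) % m + 1 - ((b + e - 1) % m + 1) - 1)
      = (e + ((b + e - 1) % m + 1) - 1) % m - ((b + e - 1) % m) - 1 := by ring
  have g1 : (2 * ((b + e - 1) % m) - (e + ((b + e - 1) % m + 1) - 1) % m) % m = b - 1 := by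
    have : 2 * ((b + e - 1) % m) - (e + ((b + e - 1) % m + 1) - 1) % m ≡ b - 1 [ZMOD m] := by
      calc 2 * ((b + e - 1) % m) - (e + ((b + e - 1) % m + 1) - 1) % m
          ≡ 2 * (b + e - 1) - (e + (b + e - 1)) [ZMOD m] := (h1.mul_left 2).sub h2
        _ = b - 1 := by ring
    rw [Int.ModEq] at this
    rw [this, Int.emod_eq_of_lt (by omega) (by omega)]
  have g2 : ((e + ((b + e - 1) % m + 1) - 1) % m - ((b + e - 1) % m) - 1) % m = e - 1 := by
    have : (e + ((b + e - 1) % m + 1) - 1) % m - ((b + e - 1) % m) - 1 ≡ e - 1 [ZMOD m] := by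
      calc (e + ((b + e - 1) % m + 1) - 1) % m - ((b + e - 1) % m) - 1
          ≡ (e + (b + e - 1)) - (b + e - 1) - 1 [ZMOD m] := (h2.sub h1).sub_right 1
        _ = e - 1 := by ring
    rw [Int.ModEq] at this
    rw [this, Int.emod_eq_of_lt (by omega) (by omega)]
  rw [k1, k2, g1, g2]
  norm_num

lemma step_cancel (m : Int) (hm : 0 < m) (p q : Int × Int)
    (hp : pvInBox m p) (hq : pvInBox m q) (h : pvStep m p = pvStep m q) : p = q := by
  rw [← inv_step m hm p hp, ← inv_step m hm q hq, h]

lemma iter_cancel (m : Int) (hm : 0 < m) (k : Nat) (p q : Int × Int)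
    (hp : pvInBox m p) (hq : pvInBox m q)
    (h : (pvStep m)^[k] p = (pvStep m)^[k] q) : p = q := by
  induction k with
  | zero => simpa using h
  | succ k ih =>
    rw [Function.iterate_succ_apply', Function.iterate_succ_apply'] at h
    exact ih (step_cancel m hm _ _ (iter_box m hm p hp k) (iter_box m hm q hq k) h)

lemma cancel_shift (m : Int) (hm : 0 < m) (p : Int × Int) (hp : pvInBox m p)
    (a b : Nat) (hab : a < b) (he : (pvStep m)^[a] p = (pvStep m)^[b] p) :
    (pvStep m)^[b - a] p = p := by
  have h : (pvStep m)^[a] ((pvStep m)^[b - a] p) = (pvStep m)^[a] p := by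
    rw [← Function.iterate_add_apply, show a + (b - a) = b by omega]
    exact he.symm
  exact iter_cancel m hm a _ p (iter_box m hm p hp _) hp h

lemma exists_return (m : Int) (hm : 2 ≤ m) (p : Int × Int) (hp : pvInBox m p) :
    ∃ r, 0 < r ∧ (pvStep m)^[r] p = p := by
  have hm0 : (0 : Int) < m := by omega
  obtain ⟨i, hi, j, hj, hne, heq⟩ :=
    Finset.exists_ne_map_eq_of_card_lt_of_maps_to
      (s := Finset.range (m.toNat * m.toNat + 1))
      (t := (Finset.Icc 1 m) ×ˢ (Finset.Icc 1 m))
      (f := fun k => (pvStep m)^[k] p)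
      (by
        rw [Finset.card_range, Finset.card_product, Int.card_Icc]
        have h1 : (m + 1 - 1).toNat = m.toNat := by omega
        rw [h1]; omega)
      (fun k _ => by
        have hb := iter_box m hm0 p hp k
        simp only [pvInBox] at hb
        simp only [Finset.mem_coe, Finset.mem_product, Finset.mem_Icc]
        exact ⟨⟨hb.1, hb.2.1⟩, ⟨hb.2.2.1, hb.2.2.2⟩⟩)
  rcases Nat.lt_or_ge i j with hij | hge
  · exact ⟨j - i, by omega, cancel_shift m hm0 p hp i j hij heq⟩
  · have hji : j < i := by omega
    exact ⟨i - j, by omega, cancel_shift m hm0 p hp j i hji heq.symm⟩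

-- the minimal period of an on-cycle state
lemma period_distinct (m : Int) (hm : 2 ≤ m) (p : Int × Int) (hp : pvInBox m p)
    (i j : Nat) (hij : i < j) (hj : j < Nat.find (exists_return m hm p hp)) :
    (pvStep m)^[i] p ≠ (pvStep m)^[j] p := by
  intro heq
  have hret := cancel_shift m (by omega) p hp i j hij heq
  exact Nat.find_min (exists_return m hm p hp) (by omega : j - i < _) ⟨by omega, hret⟩

lemma period_lt (m : Int) (hm : 2 ≤ m) (p : Int × Int) (hp : pvInBox m p) :
    Nat.find (exists_return m hm p hp) < m.toNat * m.toNat := by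
  have hm0 : (0 : Int) < m := by omega
  have hM : 2 ≤ m.toNat := by omega
  by_cases hlam : Nat.find (exists_return m hm p hp) ≤ 1
  · nlinarith
  · -- the orbit avoids the fixed point (m, m), so it misses one box element
    have hfix : pvStep m (m, m) = (m, m) := by
      simp only [pvStep, qa_step, PySem.Int.mod_eq_emod_of_pos hm0]
      have e1 : m + m - 1 = (m - 1) + m * 1 := by ring
      have e2 : (m + m - 1) % m = m - 1 := by
        rw [e1, Int.add_mul_emod_self_left, Int.emod_eq_of_lt (by omega) (by omega)]
      rw [e2]
      have e3 : m + (m - 1 + 1) - 1 = (m - 1) + m * 1 := by ring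
      rw [e3, Int.add_mul_emod_self_left, Int.emod_eq_of_lt (by omega) (by omega)]
      norm_num
    have havoid : ∀ i, i < Nat.find (exists_return m hm p hp) →
        (pvStep m)^[i] p ≠ (m, m) := by
      intro i hi hEq
      have h1 : (pvStep m)^[i + 1] p = (pvStep m)^[i] p := by
        rw [Function.iterate_succ_apply', hEq, hfix]
      by_cases hi1 : i + 1 < Nat.find (exists_return m hm p hp)
      · exact period_distinct m hm p hp i (i + 1) (by omega) hi1 h1.symm
      · have hie : i + 1 = Nat.find (exists_return m hm p hp) := by omega
        have hpm : p = (m, m) := by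
          rw [← (Nat.find_spec (exists_return m hm p hp)).2, ← hie, h1, hEq]
        have : Nat.find (exists_return m hm p hp) ≤ 1 :=
          Nat.find_min' _ ⟨Nat.one_pos, by rw [Function.iterate_one, hpm, hfix]⟩
        omega
    have hinj : Set.InjOn (fun i => (pvStep m)^[i] p)
        ↑(Finset.range (Nat.find (exists_return m hm p hp))) := by
      intro i hi j hj hij
      simp only [Finset.coe_range, Set.mem_Iio] at hi hj
      by_contra hne
      rcases Nat.lt_or_ge i j with h | h
      · exact period_distinct m hm p hp i j h hj hij
      · exact period_distinct m hm p hp j i (by omega) hi hij.symm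
    have hcard : ((Finset.range (Nat.find (exists_return m hm p hp))).image
        (fun i => (pvStep m)^[i] p)).card = Nat.find (exists_return m hm p hp) := by
      rw [Finset.card_image_of_injOn hinj, Finset.card_range]
    have hsub : (Finset.range (Nat.find (exists_return m hm p hp))).image
        (fun i => (pvStep m)^[i] p) ⊆ ((Finset.Icc 1 m ×ˢ Finset.Icc 1 m).erase (m, m)) := by
      intro q hq
      simp only [Finset.mem_image, Finset.mem_range] at hq
      obtain ⟨i, hi, rfl⟩ := hq
      refine Finset.mem_erase.mpr ⟨havoid i hi, ?_⟩
      have hb := iter_box m hm0 p hp i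
      simp only [pvInBox] at hb
      simp only [Finset.mem_product, Finset.mem_Icc]
      exact ⟨⟨hb.1, hb.2.1⟩, hb.2.2⟩
    have hle := Finset.card_le_card hsub
    have hmem : (m, m) ∈ Finset.Icc 1 m ×ˢ Finset.Icc 1 m := by
      simp only [Finset.mem_product, Finset.mem_Icc]
      exact ⟨⟨by omega, le_refl m⟩, ⟨by omega, le_refl m⟩⟩
    rw [hcard, Finset.card_erase_of_mem hmem, Finset.card_product, Int.card_Icc] at hle
    have h1 : (m + 1 - 1).toNat = m.toNat := by omega
    rw [h1] at hle
    omega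

lemma period_step (m : Int) (hm : 2 ≤ m) (p : Int × Int) (hp : pvInBox m p) :
    Nat.find (exists_return m hm (pvStep m p) (step_box m (by omega) p))
      = Nat.find (exists_return m hm p hp) := by
  have hm0 : (0 : Int) < m := by omega
  apply le_antisymm
  · refine Nat.find_min' _ ⟨(Nat.find_spec (exists_return m hm p hp)).1, ?_⟩
    rw [← Function.iterate_succ_apply, Function.iterate_succ_apply',
      (Nat.find_spec (exists_return m hm p hp)).2]
  · refine Nat.find_min' _ ⟨(Nat.find_spec (exists_return m hm (pvStep m p) (step_box m (by omega) p))).1, ?_⟩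
    have h := (Nat.find_spec (exists_return m hm (pvStep m p) (step_box m (by omega) p))).2
    rw [← Function.iterate_succ_apply, Function.iterate_succ_apply'] at h
    exact step_cancel m hm0 _ _ (iter_box m hm0 p hp _) hp h

-- A's history-scan loop returns the minimal period (in-box start)
lemma A_loop_in (m : Int) (hm : 2 ≤ m) (p : Int × Int) (hp : pvInBox m p) :
    ∀ (d j : Nat), j + d = Nat.find (exists_return m hm p hp) →
    ∀ fuel : Nat, Nat.find (exists_return m hm p hp) + 1 - j ≤ fuel →
    classify_orbit_go m fuel ((List.range j).map (fun i => (pvStep m)^[i] p)) ((pvStep m)^[j] p)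
      = (Nat.find (exists_return m hm p hp) : Int) := by
  intro d
  induction d with
  | zero =>
    intro j hj fuel hfuel
    have hjL : j = Nat.find (exists_return m hm p hp) := by omega
    subst hjL
    obtain ⟨f, rfl⟩ : ∃ f, fuel = f + 1 := ⟨fuel - 1, by omega⟩
    obtain ⟨l, hl⟩ : ∃ l, Nat.find (exists_return m hm p hp) = l + 1 :=
      ⟨Nat.find (exists_return m hm p hp) - 1,
        by have := (Nat.find_spec (exists_return m hm p hp)).1; omega⟩
    simp only [classify_orbit_go, (Nat.find_spec (exists_return m hm p hp)).2]
    rw [hl, List.range_succ_eq_map, List.map_cons, Function.iterate_zero_apply,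
      PySem.List.index?_cons_self]
    simp only [List.length_cons, List.length_map, List.length_range]
    push_cast
    omega
  | succ d ih =>
    intro j hj fuel hfuel
    obtain ⟨f, rfl⟩ : ∃ f, fuel = f + 1 := ⟨fuel - 1, by omega⟩
    have hjlt : j < Nat.find (exists_return m hm p hp) := by omega
    simp only [classify_orbit_go]
    have hnone : PySem.List.index? ((List.range j).map (fun i => (pvStep m)^[i] p))
        ((pvStep m)^[j] p) = none := by
      rw [PySem.List.index?_eq_none_iff]
      intro hmem
      obtain ⟨i, hi, heq⟩ := List.mem_map.mp hmem
      exact period_distinct m hm p hp i j (List.mem_range.mp hi) hjlt heq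
    rw [hnone]
    have hstate : qa_step ((pvStep m)^[j] p).1 ((pvStep m)^[j] p).2 m = (pvStep m)^[j + 1] p := by
      rw [Function.iterate_succ_apply']; rfl
    have hseen : (List.range j).map (fun i => (pvStep m)^[i] p) ++ [(pvStep m)^[j] p]
        = (List.range (j + 1)).map (fun i => (pvStep m)^[i] p) := by
      rw [List.range_succ, List.map_append]; rfl
    rw [hstate, hseen]
    exact ih (j + 1) (by omega) f (by omega)

-- A's history-scan loop returns the minimal period of f(p) (out-of-box start)
lemma A_loop_out (m : Int) (hm : 2 ≤ m) (p : Int × Int) (hp : ¬ pvInBox m p) :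
    ∀ (d j : Nat), 1 ≤ j →
    j + d = Nat.find (exists_return m hm (pvStep m p) (step_box m (by omega) p)) + 1 →
    ∀ fuel : Nat, Nat.find (exists_return m hm (pvStep m p) (step_box m (by omega) p)) + 2 - j ≤ fuel →
    classify_orbit_go m fuel ((List.range j).map (fun i => (pvStep m)^[i] p)) ((pvStep m)^[j] p)
      = (Nat.find (exists_return m hm (pvStep m p) (step_box m (by omega) p)) : Int) := by
  have hm0 : (0 : Int) < m := by omega
  have ht : pvInBox m (pvStep m p) := step_box m hm0 p
  have hne0 : ∀ i : Nat, p ≠ (pvStep m)^[i] (pvStep m p) := by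
    intro i h
    exact hp (h ▸ iter_box m hm0 _ ht i)
  intro d
  induction d with
  | zero =>
    intro j hj1 hj fuel hfuel
    have hjL : j = Nat.find (exists_return m hm (pvStep m p) ht) + 1 := by omega
    subst hjL
    obtain ⟨f, rfl⟩ : ∃ f, fuel = f + 1 := ⟨fuel - 1, by omega⟩
    obtain ⟨l, hl⟩ : ∃ l, Nat.find (exists_return m hm (pvStep m p) ht) = l + 1 :=
      ⟨Nat.find (exists_return m hm (pvStep m p) ht) - 1,
        by have := (Nat.find_spec (exists_return m hm (pvStep m p) ht)).1; omega⟩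
    have hstate : (pvStep m)^[Nat.find (exists_return m hm (pvStep m p) ht) + 1] p
        = pvStep m p := by
      rw [Function.iterate_succ_apply, (Nat.find_spec (exists_return m hm (pvStep m p) ht)).2]
    simp only [classify_orbit_go, hstate]
    rw [List.range_succ_eq_map, List.map_cons, Function.iterate_zero_apply, List.map_map]
    have hcomp : ((fun i => (pvStep m)^[i] p) ∘ Nat.succ)
        = fun i => (pvStep m)^[i] (pvStep m p) := by
      funext i
      exact Function.iterate_succ_apply (pvStep m) i p
    have hnep : p ≠ pvStep m p := fun h => hne0 0 (by simpa using h)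
    rw [hcomp, PySem.List.index?_cons_of_ne _ hnep]
    rw [hl, List.range_succ_eq_map, List.map_cons, Function.iterate_zero_apply,
      PySem.List.index?_cons_self]
    simp only [Option.map_some, List.length_cons, List.length_map, List.length_range]
    push_cast
    omega
  | succ d ih =>
    intro j hj1 hj fuel hfuel
    obtain ⟨f, rfl⟩ : ∃ f, fuel = f + 1 := ⟨fuel - 1, by omega⟩
    have hjlt : j ≤ Nat.find (exists_return m hm (pvStep m p) ht) := by omega
    simp only [classify_orbit_go]
    have hnone : PySem.List.index? ((List.range j).map (fun i => (pvStep m)^[i] p))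
        ((pvStep m)^[j] p) = none := by
      rw [PySem.List.index?_eq_none_iff]
      intro hmem
      obtain ⟨i, hi, heq⟩ := List.mem_map.mp hmem
      have hij : i < j := List.mem_range.mp hi
      rcases Nat.eq_zero_or_pos i with rfl | hipos
      · rw [Function.iterate_zero_apply] at heq
        have hit : (pvStep m)^[j - 1] (pvStep m p) = (pvStep m)^[j] p := by
          rw [← Function.iterate_succ_apply]
          congr 1
          omega
        exact hne0 (j - 1) (by rw [hit]; exact heq)
      · obtain ⟨i', rfl⟩ : ∃ i', i = i' + 1 := ⟨i - 1, by omega⟩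
        obtain ⟨j', rfl⟩ : ∃ j', j = j' + 1 := ⟨j - 1, by omega⟩
        rw [Function.iterate_succ_apply, Function.iterate_succ_apply] at heq
        exact period_distinct m hm (pvStep m p) ht i' j' (by omega) (by omega) heq
    rw [hnone]
    have hstate : qa_step ((pvStep m)^[j] p).1 ((pvStep m)^[j] p).2 m = (pvStep m)^[j + 1] p := by
      rw [Function.iterate_succ_apply']; rfl
    have hseen : (List.range j).map (fun i => (pvStep m)^[i] p) ++ [(pvStep m)^[j] p]
        = (List.range (j + 1)).map (fun i => (pvStep m)^[i] p) := by
      rw [List.range_succ, List.map_append]; rfl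
    rw [hstate, hseen]
    exact ih (j + 1) (by omega) (by omega) f (by omega)

-- B's bounded walk: if the period is in 2..8 it hits t at step j = period
lemma B_sat (m : Int) (hm : 2 ≤ m) (t : Int × Int) (ht : pvInBox m t)
    (h8 : Nat.find (exists_return m hm t ht) ≤ 8) :
    ∀ (k j : Nat), 2 ≤ j → j ≤ Nat.find (exists_return m hm t ht) → j + k = 9 →
    label_walk m t k ((pvStep m)^[j] t) = "satellite" := by
  intro k
  induction k with
  | zero => intro j _ hjL hj9; omega
  | succ k ih =>
    intro j hj2 hjL hj9
    simp only [label_walk]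
    by_cases hhit : (pvStep m)^[j] t = t
    · rw [if_pos hhit]
    · rw [if_neg hhit]
      have hjne : j ≠ Nat.find (exists_return m hm t ht) := fun h => by
        rw [h, (Nat.find_spec (exists_return m hm t ht)).2] at hhit
        exact hhit rfl
      have hstate : qa_step_alt ((pvStep m)^[j] t).1 ((pvStep m)^[j] t).2 m
          = (pvStep m)^[j + 1] t := by
        rw [Function.iterate_succ_apply']; rfl
      rw [hstate]
      exact ih (j + 1) (by omega) (by omega) (by omega)

-- B's bounded walk: if the period exceeds 8 all 7 checks miss
lemma B_cos (m : Int) (hm : 2 ≤ m) (t : Int × Int) (ht : pvInBox m t)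
    (h8 : 9 ≤ Nat.find (exists_return m hm t ht)) :
    ∀ (k j : Nat), 2 ≤ j → j + k = 9 →
    label_walk m t k ((pvStep m)^[j] t) = "cosmos" := by
  intro k
  induction k with
  | zero => intro j _ _; rfl
  | succ k ih =>
    intro j hj2 hj9
    simp only [label_walk]
    have hne : (pvStep m)^[j] t ≠ t := by
      intro h
      exact period_distinct m hm t ht 0 j (by omega) (by omega)
        (by simpa using h.symm)
    rw [if_neg hne]
    have hstate : qa_step_alt ((pvStep m)^[j] t).1 ((pvStep m)^[j] t).2 m
        = (pvStep m)^[j + 1] t := by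
      rw [Function.iterate_succ_apply']; rfl
    rw [hstate]
    exact ih (j + 1) (by omega) (by omega)

-- A's classify_orbit returns the minimal period of step (b, e)
lemma classify_val (m b e : Int) (hm : 2 ≤ m) :
    classify_orbit b e m
      = (Nat.find (exists_return m hm (pvStep m (b, e)) (step_box m (by omega) (b, e))) : Int) := by
  have hm0 : (0 : Int) < m := by omega
  have hmm : m * m + 1 = ((m.toNat * m.toNat + 1 : Nat) : Int) := by
    push_cast [Int.toNat_of_nonneg (show (0 : Int) ≤ m by omega)]
    ring
  have htn1 : (m * m + 1).toNat = m.toNat * m.toNat + 1 := by rw [hmm, Int.toNat_natCast]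
  have ht : pvInBox m (pvStep m (b, e)) := step_box m hm0 (b, e)
  have hLlt := period_lt m hm (pvStep m (b, e)) ht
  by_cases hpbox : pvInBox m (b, e)
  · -- in-box start: A returns the period of (b, e), which equals that of step (b, e)
    have hA := A_loop_in m hm (b, e) hpbox (Nat.find (exists_return m hm (b, e) hpbox)) 0
      (by omega) (m.toNat * m.toNat + 1)
      (by have := period_lt m hm (b, e) hpbox; omega)
    simp only [List.range_zero, List.map_nil, Function.iterate_zero_apply] at hA
    rw [classify_orbit, htn1, hA, period_step m hm (b, e) hpbox]
  · -- out-of-box start: A returns the period of step (b, e) directly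
    have hA := A_loop_out m hm (b, e) hpbox
      (Nat.find (exists_return m hm (pvStep m (b, e)) ht)) 1
      (le_refl 1) (by omega) (m.toNat * m.toNat) (by omega)
    have hseen1 : (List.range 1).map (fun i => (pvStep m)^[i] (b, e)) = [(b, e)] := by
      simp
    rw [hseen1] at hA
    rw [classify_orbit, htn1]
    have hnone : PySem.List.index? ([] : List (Int × Int)) (b, e) = none :=
      (PySem.List.index?_eq_none_iff _ _).mpr (List.not_mem_nil)
    simp only [classify_orbit_go, hnone, List.nil_append]
    have hst : qa_step b e m = (pvStep m)^[1] (b, e) := by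
      rw [Function.iterate_one]; rfl
    rw [hst]
    exact hA

lemma label_eq (m b e : Int) (hm : 2 ≤ m) :
    label_of_state b e m = orbit_type_label (classify_orbit b e m) := by
  rw [classify_val m b e hm, orbit_type_label]
  have ht : pvInBox m (pvStep m (b, e)) := step_box m (by omega) (b, e)
  have hLpos := (Nat.find_spec (exists_return m hm (pvStep m (b, e)) ht)).1
  show (if pvStep m (pvStep m (b, e)) = pvStep m (b, e) then "singularity"
      else label_walk m (pvStep m (b, e)) 7
        (pvStep m (pvStep m (pvStep m (b, e))))) = _
  by_cases h1 : pvStep m (pvStep m (b, e)) = pvStep m (b, e)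
  · have hL1 : Nat.find (exists_return m hm (pvStep m (b, e)) ht) = 1 := by
      have hle : Nat.find (exists_return m hm (pvStep m (b, e)) ht) ≤ 1 :=
        Nat.find_min' _ ⟨Nat.one_pos, by rw [Function.iterate_one]; exact h1⟩
      omega
    rw [if_pos h1, hL1]
    norm_num
  · have hL2 : 2 ≤ Nat.find (exists_return m hm (pvStep m (b, e)) ht) := by
      rcases Nat.lt_or_ge (Nat.find (exists_return m hm (pvStep m (b, e)) ht)) 2 with h | h
      · exfalso
        have h1' := (Nat.find_spec (exists_return m hm (pvStep m (b, e)) ht)).2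
        have : Nat.find (exists_return m hm (pvStep m (b, e)) ht) = 1 := by omega
        rw [this, Function.iterate_one] at h1'
        exact h1 h1'
      · exact h
    rw [if_neg h1]
    have hstart : pvStep m (pvStep m (pvStep m (b, e)))
        = (pvStep m)^[2] (pvStep m (b, e)) := rfl
    rw [hstart]
    by_cases h8 : Nat.find (exists_return m hm (pvStep m (b, e)) ht) ≤ 8
    · rw [B_sat m hm (pvStep m (b, e)) ht h8 7 2 (le_refl 2) hL2 rfl]
      rw [if_neg (by exact_mod_cast (by omega : Nat.find (exists_return m hm (pvStep m (b, e)) ht) ≠ 1)),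
        if_pos (by exact_mod_cast h8)]
    · rw [B_cos m hm (pvStep m (b, e)) ht (by omega) 7 2 (le_refl 2) rfl]
      rw [if_neg (by exact_mod_cast (by omega : Nat.find (exists_return m hm (pvStep m (b, e)) ht) ≠ 1)),
        if_neg (by
          exact_mod_cast (by omega : ¬ Nat.find (exists_return m hm (pvStep m (b, e)) ht) ≤ 8))]

lemma body_eq (m : Int) (hm : 2 ≤ m) (acc : PySem.Dict String Int × PySem.Dict String Int)
    (p : Int × Int) : analyze_body m acc p = analyze_body_alt m acc p := by
  simp only [analyze_body, analyze_body_alt, PySem.Dict.modify,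
    label_eq m p.1 p.2 hm, label_eq 3 _ _ (by omega)]

-- ===== VERDICT (by name: the statement is the Claim_ definition above) =====
theorem analyze_mod3_reduction_spec : Claim_equal_analyze_mod3_reduction := by
  intro cb ce m _
  unfold Spec_analyze_mod3_reduction analyze_mod3_reduction analyze_mod3_reduction_alt
  by_cases hm : m ≤ 3
  · simp [hm]
  · simp only [if_neg hm]
    have : analyze_body m = analyze_body_alt m :=
      funext fun acc => funext fun p => body_eq m (by omega) acc p
    rw [this]
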